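-- pv_equiv track=rewrite | github.com/pypi-data/pypi-mirror-4 | packages/Watson/Watson-0.1.03.tar.gz/Watson-0.1.03/watson/grammar.py | _create_options
-- ===== SOURCE A (Python) =====
-- def _create_options(string):
--     count = 0
--     had_counted = False
--     i = 0
--     options = []
--
--     for j in range(len(string)):
--         if string[j] == "[":
--             count += 1
--             if not had_counted:
--                 i = j
--             had_counted = True
--         if string[j] == "]":
--             count -= 1
--             if not had_counted:
--                 raise Exception
--         if count == 0 and had_counted:
--             if not options:
--                 options = [_create_options(string[:i] + string[i + 1:j] + string[j + 1:]),
--                            _create_options(string[:i] + string[j + 1:])]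
--                 options = [x for y in options for x in y]
--     if count != 0:
--         raise Exception
--
--     if not options:
--         options = [string]
--     return options
-- ===== SOURCE B (Python) =====
-- def _create_options(string):
--     stack = []
--     cur = [""]
--     for ch in string:
--         if ch == "[":
--             stack.append(cur)
--             cur = [""]
--         elif ch == "]":
--             if not stack:
--                 raise Exception
--             prev = stack.pop()
--             cur = [p + o for p in prev for o in cur + [""]]
--         else:
--             cur = [c + ch for c in cur]
--     if stack:
--         raise Exception
--     return cur
-- ===== Notes on version B (the rewrite author's own statement) =====
-- stated objective: alternative
-- what changed: A recursively re-expands the whole string for each optional group (two recursive calls on rebuilt copies of the string); B is a single non-recursive left-to-right pass keeping an explicit stack of variant lists, combining each bracket group's variants with a cross product when its ']' is reached.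
import Mathlib
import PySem

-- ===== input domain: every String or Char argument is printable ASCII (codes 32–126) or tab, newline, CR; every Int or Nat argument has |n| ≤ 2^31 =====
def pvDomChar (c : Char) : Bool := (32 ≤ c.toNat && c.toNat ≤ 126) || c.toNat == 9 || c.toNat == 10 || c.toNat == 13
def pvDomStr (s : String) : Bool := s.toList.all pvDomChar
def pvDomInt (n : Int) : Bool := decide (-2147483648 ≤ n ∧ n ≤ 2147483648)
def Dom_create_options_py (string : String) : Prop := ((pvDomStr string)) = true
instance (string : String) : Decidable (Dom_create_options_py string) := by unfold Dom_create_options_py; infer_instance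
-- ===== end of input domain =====

-- B replaces A's recursive rebuild-and-reexpand of the string (two recursive calls on sliced copies
-- per bracket group) with one non-recursive left-to-right pass over the characters keeping an
-- explicit stack of variant lists (objective: alternative; same results, same Exception cases).

-- ===== PORT A =====
-- The for-j-in-range loop of A, as structural recursion over the remaining characters, carrying the
-- index j and A's loop state (count, had_counted, i, options); `rec` is the recursive call to
-- _create_options (instantiated with the fueled goA below).  none = the Exception raised in the loop.
def loopA (rec : List Char → Option (List (List Char))) (s : List Char) :
    List Char → Nat → Int → Bool → Nat → List (List Char) →
    Option (Int × Bool × Nat × List (List Char))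
  | [], _, count, had, i, opts => some (count, had, i, opts)
  | c :: rest, j, count, had, i, opts =>
    let count1 := if c = '[' then count + 1 else count
    let i1 := if c = '[' ∧ ¬had then j else i
    let had1 := if c = '[' then true else had
    if c = ']' ∧ had1 = false then none
    else
      let count2 := if c = ']' then count1 - 1 else count1
      if count2 = 0 ∧ had1 = true ∧ opts = [] then
        match rec (PySem.List.slice s none (some (i1 : Int)) ++
                   PySem.List.slice s (some ((i1 : Int) + 1)) (some (j : Int)) ++
                   PySem.List.slice s (some ((j : Int) + 1)) none),
              rec (PySem.List.slice s none (some (i1 : Int)) ++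
                   PySem.List.slice s (some ((j : Int) + 1)) none) with
        | some v1, some v2 => loopA rec s rest (j + 1) count2 had1 i1 (v1 ++ v2)
        | _, _ => none
      else loopA rec s rest (j + 1) count2 had1 i1 opts

-- _create_options with fuel for termination (the top-level call passes enough fuel for every input
-- satisfying Pre_; fuel only makes the recursion well-founded); none = Exception.
def goA : Nat → List Char → Option (List (List Char))
  | 0, _ => none
  | fuel + 1, s =>
    match loopA (goA fuel) s s 0 0 false 0 [] with
    | none => none
    | some (count, _, _, opts) =>
      if count ≠ 0 then none
      else some (if opts = [] then [s] else opts)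

def create_options_py (string : String) : List String :=
  match goA (string.toList.length + 1) string.toList with
  | some vs => vs.map (fun cs => String.ofList cs)
  | none => []

-- ===== PORT B =====
-- [p + o for p in prev for o in opts]
def crossB (prev opts : List (List Char)) : List (List Char) :=
  prev.flatMap (fun p => opts.map (fun o => p ++ o))

-- B's for-ch-in-string loop; state = (stack of variant lists, current variants); none = Exception.
def loopB : List Char → List (List (List Char)) → List (List Char) →
    Option (List (List (List Char)) × List (List Char))
  | [], stk, cur => some (stk, cur)
  | c :: rest, stk, cur =>
    if c = '[' then loopB rest (cur :: stk) [[]]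
    else if c = ']' then
      match stk with
      | [] => none
      | prev :: stk' => loopB rest stk' (crossB prev (cur ++ [[]]))
    else loopB rest stk (cur.map (fun v => v ++ [c]))

def create_options_py_alt (string : String) : List String :=
  match loopB string.toList [] [[]] with
  | some ([], cur) => cur.map (fun cs => String.ofList cs)
  | _ => []

-- ===== PRECONDITION & SPEC =====
-- bracket weight of one character and bracket count of a list, used to state Pre_
def wBr (c : Char) : Int := if c = '[' then 1 else if c = ']' then -1 else 0
def cnt (xs : List Char) : Int := (xs.map wBr).sum

-- Pre_: the square brackets of the string are balanced (every prefix count ≥ 0, total count 0);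
-- these are exactly the inputs on which A returns instead of raising Exception.
def Pre_create_options_py (string : String) : Prop :=
  (∀ n < string.toList.length, 0 ≤ cnt (string.toList.take n)) ∧ cnt string.toList = 0
instance (string : String) : Decidable (Pre_create_options_py string) := by
  unfold Pre_create_options_py; infer_instance

def pvWitness_create_options_py : String := "a[b]c"

def Spec_create_options_py (string : String) (out : List String) : Prop := out = create_options_py_alt string
instance (string : String) (out : List String) : Decidable (Spec_create_options_py string out) := by
  unfold Spec_create_options_py; infer_instance

-- ===== CLAIM (what is proved, stated in full; the proofs are below) =====
def Claim_equal_create_options_py : Prop := ∀ (string : String), Dom_create_options_py string → Pre_create_options_py string → Spec_create_options_py string (create_options_py string)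

-- ===== LEMMAS AND PROOFS =====

def nonnegPref (xs : List Char) : Prop := ∀ n : Nat, 0 ≤ cnt (xs.take n)
def bal (xs : List Char) : Prop := nonnegPref xs ∧ cnt xs = 0
def nobr (xs : List Char) : Prop := ∀ c ∈ xs, c ≠ '[' ∧ c ≠ ']'

theorem cnt_cons (c : Char) (xs : List Char) : cnt (c :: xs) = wBr c + cnt xs := by simp [cnt]
theorem cnt_append (a b : List Char) : cnt (a ++ b) = cnt a + cnt b := by simp [cnt]

theorem crossB_unit_left (b : List (List Char)) : crossB [[]] b = b := by simp [crossB]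
theorem crossB_unit_right (a : List (List Char)) : crossB a [[]] = a := by simp [crossB]
theorem crossB_single (p : List Char) (b : List (List Char)) : crossB [p] b = b.map (fun o => p ++ o) := by simp [crossB]
theorem crossB_singleton_right (a : List (List Char)) (x : List Char) : crossB a [x] = a.map (fun v => v ++ x) := by
  induction a with
  | nil => rfl
  | cons y ys ih => simp [crossB] at ih ⊢; exact ih
theorem crossB_append_left (a b c : List (List Char)) : crossB (a ++ b) c = crossB a c ++ crossB b c := by
  simp [crossB, List.flatMap_append]
theorem crossB_assoc (a b c : List (List Char)) : crossB (crossB a b) c = crossB a (crossB b c) := by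
  simp [crossB, List.flatMap_map, List.map_flatMap, List.flatMap_assoc, List.map_map, Function.comp_def, List.append_assoc]
theorem crossB_ne_nil (a b : List (List Char)) (ha : a ≠ []) (hb : b ≠ []) : crossB a b ≠ [] := by
  cases a with
  | nil => simp at ha
  | cons x xs =>
    cases b with
    | nil => simp at hb
    | cons y ys => simp [crossB]

theorem cnt_eq_zero_of_nobr (xs : List Char) (h : nobr xs) : cnt xs = 0 := by
  induction xs with
  | nil => rfl
  | cons c ys ih =>
    have hc := h c (by simp)
    rw [cnt_cons, ih (fun d hd => h d (by simp [hd]))]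
    simp [wBr, hc.1, hc.2]
theorem nobr_take (xs : List Char) (n : Nat) (h : nobr xs) : nobr (xs.take n) :=
  fun c hc => h c (List.mem_of_mem_take hc)
theorem bal_of_nobr (xs : List Char) (h : nobr xs) : bal xs :=
  ⟨fun n => by rw [cnt_eq_zero_of_nobr _ (nobr_take xs n h)], cnt_eq_zero_of_nobr xs h⟩
theorem bal_nil : bal ([] : List Char) := bal_of_nobr [] (by intro c hc; simp at hc)
theorem bal_append (a b : List Char) (ha : bal a) (hb : bal b) : bal (a ++ b) := by
  constructor
  · intro n
    rw [List.take_append, cnt_append]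
    have := ha.1 n; have := hb.1 (n - a.length); omega
  · rw [cnt_append, ha.2, hb.2]; ring
theorem bal_cons_literal (c : Char) (ys : List Char) (hc : wBr c = 0) (h : bal (c :: ys)) : bal ys := by
  constructor
  · intro n
    have := h.1 (n + 1)
    rwa [List.take_succ_cons, cnt_cons, hc, zero_add] at this
  · have := h.2; rwa [cnt_cons, hc, zero_add] at this
theorem nobr_of_bal_no_open (xs : List Char) (h : bal xs) (hno : '[' ∉ xs) : nobr xs := by
  induction xs with
  | nil => intro c hc; simp at hc
  | cons c ys ih =>
    have hc1 : c ≠ '[' := by intro hh; exact hno (by simp [hh])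
    have hc2 : c ≠ ']' := by
      intro hh
      have := h.1 1
      simp [List.take_succ_cons, hh, wBr, cnt] at this
    have hw : wBr c = 0 := by simp [wBr, hc1, hc2]
    intro d hd
    rcases List.mem_cons.1 hd with h1 | h2
    · exact h1 ▸ ⟨hc1, hc2⟩
    · exact ih (bal_cons_literal c ys hw h) (fun hh => hno (by simp [hh])) d h2

theorem split1 : ∀ (N : Nat) (ys : List Char), ys.length ≤ N → cnt ys < 0 →
    ∃ C R, ys = C ++ ']' :: R ∧ bal C := by
  intro N
  induction N with
  | zero =>
    intro ys hlen hcnt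
    have : ys = [] := List.eq_nil_of_length_eq_zero (by omega)
    subst this; simp [cnt] at hcnt
  | succ N ih =>
    intro ys hlen hcnt
    cases ys with
    | nil => simp [cnt] at hcnt
    | cons c zs =>
      by_cases hc : c = ']'
      · exact ⟨[], zs, by simp [hc], bal_nil⟩
      by_cases ho : c = '['
      · subst ho
        have hz : cnt zs < 0 := by
          have := cnt_cons '[' zs; simp [wBr] at this; omega
        have hlen' : zs.length + 1 ≤ N + 1 := by simpa using hlen
        obtain ⟨C₁, R₁, hzs, hC₁⟩ := ih zs (by omega) hz
        have hR₁cnt : cnt R₁ < 0 := by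
          have h1 : cnt zs = cnt C₁ + (-1) + cnt R₁ := by
            rw [hzs, cnt_append, cnt_cons]; simp [wBr]; ring
          have h2 : cnt ('[' :: zs) = 1 + cnt zs := by rw [cnt_cons]; simp [wBr]
          have := hC₁.2; omega
        have hR₁len : R₁.length ≤ N := by
          have : zs.length = C₁.length + 1 + R₁.length := by rw [hzs]; simp; omega
          omega
        obtain ⟨C₂, R₂, hR₁, hC₂⟩ := ih R₁ hR₁len hR₁cnt
        refine ⟨'[' :: (C₁ ++ ']' :: C₂), R₂, ?_, ?_, ?_⟩
        · rw [hzs, hR₁]; simp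
        · -- nonnegPref
          intro n
          match n with
          | 0 => simp [cnt]
          | m + 1 =>
            rw [List.take_succ_cons, cnt_cons]
            rw [List.take_append, cnt_append]
            have h1 : 0 ≤ cnt (C₁.take m) := hC₁.1 m
            have h2 : -1 ≤ cnt ((']' :: C₂).take (m - C₁.length)) := by
              match hm : m - C₁.length with
              | 0 => simp [cnt]
              | k + 1 =>
                rw [List.take_succ_cons, cnt_cons]
                have := hC₂.1 k
                simp [wBr]; omega
            simp [wBr] at *; omega
        · rw [cnt_cons, cnt_append, cnt_cons, hC₁.2, hC₂.2]; simp [wBr]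
      · have hw : wBr c = 0 := by simp [wBr, ho, hc]
        have hz : cnt zs < 0 := by rw [cnt_cons, hw] at hcnt; omega
        have hlen' : zs.length + 1 ≤ N + 1 := by simpa using hlen
        obtain ⟨C₁, R₁, hzs, hC₁⟩ := ih zs (by omega) hz
        refine ⟨c :: C₁, R₁, by rw [hzs]; simp, ?_, ?_⟩
        · intro n
          match n with
          | 0 => simp [cnt]
          | m + 1 => rw [List.take_succ_cons, cnt_cons, hw]; have := hC₁.1 m; omega
        · rw [cnt_cons, hw, hC₁.2]; ring

theorem decomp : ∀ (xs : List Char), bal xs → '[' ∈ xs →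
    ∃ P C R, xs = P ++ '[' :: (C ++ ']' :: R) ∧ nobr P ∧ bal C ∧ bal R := by
  intro xs
  induction xs with
  | nil => intro _ h; simp at h
  | cons c ys ih =>
    intro hbal hmem
    by_cases ho : c = '['
    · subst ho
      have hy : cnt ys < 0 := by
        have := hbal.2; rw [cnt_cons] at this; simp [wBr] at this; omega
      obtain ⟨C, R, hys, hC⟩ := split1 ys.length ys le_rfl hy
      refine ⟨[], C, R, by rw [hys]; simp, by intro d hd; simp at hd, hC, ?_, ?_⟩
      · -- nonnegPref R
        intro n
        have h0 := hbal.1 ((C.length + (1 + n)) + 1)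
        rw [List.take_succ_cons, cnt_cons, hys, List.take_append,
            List.take_of_length_le (by omega), cnt_append] at h0
        have h1 : C.length + (1 + n) - C.length = n + 1 := by omega
        rw [h1, List.take_succ_cons, cnt_cons] at h0
        have h2 := hC.2
        simp [wBr] at h0; omega
      · have := hbal.2
        rw [hys, cnt_cons, cnt_append, cnt_cons, hC.2] at this
        simp [wBr] at this; omega
    · have hc : c ≠ ']' := by
        intro hh
        have := hbal.1 1
        simp [List.take_succ_cons, hh, wBr, cnt] at this
      have hw : wBr c = 0 := by simp [wBr, ho, hc]
      have hmem' : '[' ∈ ys := by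
        rcases List.mem_cons.1 hmem with h | h
        · exact absurd h.symm ho
        · exact h
      obtain ⟨P, C, R, hys, hP, hC, hR⟩ := ih (bal_cons_literal c ys hw hbal) hmem'
      refine ⟨c :: P, C, R, by rw [hys]; simp, ?_, hC, hR⟩
      intro d hd
      rcases List.mem_cons.1 hd with h | h
      · exact h ▸ ⟨ho, hc⟩
      · exact hP d h

theorem loopB_open (t : List Char) (stk : List (List (List Char))) (cur : List (List Char)) :
    loopB ('[' :: t) stk cur = loopB t (cur :: stk) [[]] := by simp [loopB]

theorem loopB_close (t : List Char) (prev : List (List Char)) (stk : List (List (List Char))) (cur : List (List Char)) :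
    loopB (']' :: t) (prev :: stk) cur = loopB t stk (crossB prev (cur ++ [[]])) := by simp [loopB]

theorem loopB_literals : ∀ (xs : List Char), nobr xs → ∀ t stk cur,
    loopB (xs ++ t) stk cur = loopB t stk (cur.map (fun v => v ++ xs)) := by
  intro xs
  induction xs with
  | nil => intro _ t stk cur; simp
  | cons c0 rest ih =>
    intro hn t stk cur
    have h1 := hn c0 (by simp)
    have step : loopB ((c0 :: rest) ++ t) stk cur = loopB (rest ++ t) stk (cur.map (fun v => v ++ [c0])) := by
      simp [loopB, h1.1, h1.2]
    rw [step, ih (fun d hd => hn d (by simp [hd])) t stk]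
    simp [List.map_map, Function.comp_def]

theorem loopA_nil (rec : List Char → Option (List (List Char))) (s : List Char) (j : Nat) (c : Int) (h : Bool) (i : Nat) (o : List (List Char)) :
    loopA rec s [] j c h i o = some (c, h, i, o) := rfl

theorem loopA_open (rec : List Char → Option (List (List Char))) (s t : List Char) (j i : Nat) :
    loopA rec s ('[' :: t) j 0 false i [] = loopA rec s t (j + 1) 1 true j [] := by
  simp [loopA]

theorem loopA_literals (rec : List Char → Option (List (List Char))) (s : List Char) :
    ∀ (xs : List Char), nobr xs → ∀ t j (c : Int) i,
    loopA rec s (xs ++ t) j c false i [] = loopA rec s t (j + xs.length) c false i [] := by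
  intro xs
  induction xs with
  | nil => intro _ t j c i; simp
  | cons c0 rest ih =>
    intro hn t j c i
    have h1 := hn c0 (by simp)
    have step : loopA rec s ((c0 :: rest) ++ t) j c false i [] = loopA rec s (rest ++ t) (j + 1) c false i [] := by
      simp [loopA, h1.1, h1.2]
    rw [step, ih (fun d hd => hn d (by simp [hd])) t (j + 1) c i]
    congr 1
    simp; omega

theorem loopA_scan (rec : List Char → Option (List (List Char))) (s : List Char) :
    ∀ (xs : List Char) (j : Nat) (c : Int) (i : Nat),
    (∀ n, 1 ≤ n → n ≤ xs.length → c + cnt (xs.take n) ≠ 0) → ∀ t,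
    loopA rec s (xs ++ t) j c true i [] = loopA rec s t (j + xs.length) (c + cnt xs) true i [] := by
  intro xs
  induction xs with
  | nil => intro j c i _ t; simp [cnt]
  | cons c0 rest ih =>
    intro j c i hne t
    have h1 : c + wBr c0 ≠ 0 := by
      have := hne 1 (by omega) (by simp)
      rw [List.take_succ_cons, List.take_zero, cnt_cons, cnt, List.map_nil, List.sum_nil, add_zero] at this
      exact this
    have step : loopA rec s ((c0 :: rest) ++ t) j c true i [] = loopA rec s (rest ++ t) (j + 1) (c + wBr c0) true i [] := by
      by_cases ho : c0 = '['
      · subst ho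
        have e : c + wBr '[' = c + 1 := by simp [wBr]
        rw [e] at h1 ⊢
        simp [loopA, h1]
      · by_cases hc : c0 = ']'
        · subst hc
          have e : c + wBr ']' = c - 1 := by simp [wBr]; ring
          rw [e] at h1 ⊢
          simp [loopA, h1]
        · have e : c + wBr c0 = c := by simp [wBr, ho, hc]
          rw [e] at h1 ⊢
          simp [loopA, ho, hc, h1]
    rw [step, ih (j + 1) (c + wBr c0) i (fun n hn1 hn2 => by
      have := hne (n + 1) (by omega) (by simp; omega)
      rwa [List.take_succ_cons, cnt_cons, ← add_assoc] at this) t]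
    congr 1
    · simp; omega
    · rw [cnt_cons]; ring

theorem loopA_post (rec : List Char → Option (List (List Char))) (s : List Char) :
    ∀ (xs : List Char) (j : Nat) (c : Int) (i : Nat) (o : List (List Char)), o ≠ [] → ∀ t,
    loopA rec s (xs ++ t) j c true i o = loopA rec s t (j + xs.length) (c + cnt xs) true i o := by
  intro xs
  induction xs with
  | nil => intro j c i o _ t; simp [cnt]
  | cons c0 rest ih =>
    intro j c i o ho t
    have step : loopA rec s ((c0 :: rest) ++ t) j c true i o = loopA rec s (rest ++ t) (j + 1) (c + wBr c0) true i o := by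
      by_cases h2 : c0 = '['
      · subst h2
        have e : c + wBr '[' = c + 1 := by simp [wBr]
        rw [e]
        simp [loopA, ho]
      · by_cases hc : c0 = ']'
        · subst hc
          have e : c + wBr ']' = c - 1 := by simp [wBr]; ring
          rw [e]
          simp [loopA, ho]
        · have e : c + wBr c0 = c := by simp [wBr, h2, hc]
          rw [e]
          simp [loopA, h2, hc, ho]
    rw [step, ih (j + 1) (c + wBr c0) i o ho t]
    congr 1
    · simp; omega
    · rw [cnt_cons]; ring

theorem sliceE2 (P C l : List Char) :
    PySem.List.slice (P ++ '[' :: (C ++ l)) (some ((P.length : Int) + 1)) (some ((P.length : Int) + 1 + (C.length : Int))) = C := by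
  have e : ((P.length : Int) + 1) = ((P.length + 1 : Nat) : Int) := by push_cast; ring
  have e' : ((P.length : Int) + 1 + (C.length : Int)) = ((P.length + 1 + C.length : Nat) : Int) := by push_cast; ring
  rw [e', e, PySem.List.slice_natCast]
  have e2 : P ++ '[' :: (C ++ l) = (P ++ ['[']) ++ (C ++ l) := by simp
  rw [e2, List.drop_left' (show (P ++ ['[']).length = P.length + 1 by simp)]
  rw [show P.length + 1 + C.length - (P.length + 1) = C.length by omega, List.take_left]

theorem sliceE3 (P C R : List Char) :
    PySem.List.slice (P ++ '[' :: (C ++ ']' :: R)) (some ((P.length : Int) + 1 + (C.length : Int) + 1)) none = R := by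
  have e : ((P.length : Int) + 1 + (C.length : Int) + 1) = ((P.length + 1 + C.length + 1 : Nat) : Int) := by push_cast; ring
  rw [e, PySem.List.slice_from_natCast]
  have e2 : P ++ '[' :: (C ++ ']' :: R) = (P ++ '[' :: C ++ [']']) ++ R := by simp
  rw [e2, List.drop_left' (show (P ++ '[' :: C ++ [']']).length = P.length + 1 + C.length + 1 by simp; omega)]

theorem loopA_close_at (rec : List Char → Option (List (List Char))) (P C R t : List Char) (V₁ V₂ : List (List Char))
    (h1 : rec (P ++ C ++ R) = some V₁) (h2 : rec (P ++ R) = some V₂) :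
    loopA rec (P ++ '[' :: (C ++ ']' :: R)) (']' :: t) (P.length + 1 + C.length) 1 true P.length [] =
    loopA rec (P ++ '[' :: (C ++ ']' :: R)) t (P.length + 1 + C.length + 1) 0 true P.length (V₁ ++ V₂) := by
  have hbr : ¬((']' : Char) = '[') := by decide
  have f2 := sliceE2 P C (']' :: R)
  have f3 := sliceE3 P C R
  rw [List.append_assoc] at h1
  simp only [loopA]
  norm_num [hbr]
  rw [f2, f3, h1, h2]
theorem loopA_end (rec : List Char → Option (List (List Char))) (s : List Char)
    (xs : List Char) (j : Nat) (c : Int) (i : Nat) (o : List (List Char)) (ho : o ≠ []) :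
    loopA rec s xs j c true i o = some (c + cnt xs, true, i, o) := by
  have h := loopA_post rec s xs j c i o ho []
  rw [List.append_nil] at h
  rw [h, loopA_nil]

theorem crossB_single_append (p : List Char) (b c : List (List Char)) :
    crossB [p] (b ++ c) = crossB [p] b ++ crossB [p] c := by
  rw [crossB_single, crossB_single, crossB_single, List.map_append]
theorem main_aux : ∀ (N : Nat) (xs : List Char), xs.length ≤ N → bal xs →
    ∃ V : List (List Char), V ≠ [] ∧
      (∀ t stk cur, loopB (xs ++ t) stk cur = loopB t stk (crossB cur V)) ∧
      (∀ fuel, xs.length < fuel → goA fuel xs = some V) := by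
  intro N
  induction N with
  | zero =>
    intro xs hlen hbal
    have hnil : xs = [] := List.eq_nil_of_length_eq_zero (by omega)
    subst hnil
    refine ⟨[[]], by simp, ?_, ?_⟩
    · intro t stk cur; simp [crossB_unit_right]
    · intro fuel hf
      match fuel, hf with
      | f + 1, _ => simp [goA, loopA]
  | succ N ih =>
    intro xs hlen hbal
    by_cases hmem : '[' ∈ xs
    case neg =>
      have hnb : nobr xs := nobr_of_bal_no_open xs hbal hmem
      refine ⟨[xs], by simp, ?_, ?_⟩
      · intro t stk cur
        rw [loopB_literals xs hnb t stk cur, crossB_singleton_right]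
      · intro fuel hf
        match fuel, hf with
        | f + 1, _ =>
          have h0 : loopA (goA f) xs (xs ++ []) 0 0 false 0 [] = some (0, false, 0, []) := by
            rw [loopA_literals (goA f) xs xs hnb [] 0 0 0, loopA_nil]
          rw [List.append_nil] at h0
          simp [goA, h0]
    case pos =>
      obtain ⟨P, C, R, hxs, hP, hC, hR⟩ := decomp xs hbal hmem
      subst hxs
      have hlen' : P.length + C.length + R.length + 2 ≤ N + 1 := by
        simp at hlen; omega
      have hbalP : bal P := bal_of_nobr P hP
      obtain ⟨VC, hVCne, hVCB, hVCA⟩ := ih C (by omega) hC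
      obtain ⟨VR, hVRne, hVRB, hVRA⟩ := ih R (by omega) hR
      obtain ⟨V₁, hV₁ne, hV₁B, hV₁A⟩ := ih (P ++ C ++ R) (by simp; omega)
        (bal_append _ _ (bal_append _ _ hbalP hC) hR)
      obtain ⟨V₂, hV₂ne, hV₂B, hV₂A⟩ := ih (P ++ R) (by simp; omega) (bal_append _ _ hbalP hR)
      -- identify V₁ and V₂ through loopB
      have hV₁eq : V₁ = crossB (crossB [P] VC) VR := by
        have h1 : loopB ((P ++ C ++ R) ++ []) [] [[]] = some ([], V₁) := by
          rw [hV₁B]; simp [loopB, crossB_unit_left]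
        have h2 : loopB ((P ++ C ++ R) ++ []) [] [[]] = some ([], crossB (crossB [P] VC) VR) := by
          have e : (P ++ C ++ R) ++ [] = P ++ (C ++ (R ++ [])) := by simp
          rw [e, loopB_literals P hP, hVCB, hVRB]
          simp [loopB]
        rw [h1] at h2
        simpa using h2
      have hV₂eq : V₂ = crossB [P] VR := by
        have h1 : loopB ((P ++ R) ++ []) [] [[]] = some ([], V₂) := by
          rw [hV₂B]; simp [loopB, crossB_unit_left]
        have h2 : loopB ((P ++ R) ++ []) [] [[]] = some ([], crossB [P] VR) := by
          have e : (P ++ R) ++ [] = P ++ (R ++ []) := by simp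
          rw [e, loopB_literals P hP, hVRB]
          simp [loopB]
        rw [h1] at h2
        simpa using h2
      refine ⟨crossB (crossB [P] (VC ++ [[]])) VR,
        crossB_ne_nil _ _ (crossB_ne_nil _ _ (by simp) (by simp)) hVRne, ?_, ?_⟩
      · -- B action
        intro t stk cur
        have e1 : (P ++ '[' :: (C ++ ']' :: R)) ++ t = P ++ ('[' :: (C ++ (']' :: (R ++ t)))) := by simp
        rw [e1, loopB_literals P hP, loopB_open, hVCB, loopB_close, hVRB, crossB_unit_left]
        rw [show cur.map (fun v => v ++ P) = crossB cur [P] from (crossB_singleton_right cur P).symm]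
        rw [crossB_assoc, crossB_assoc, crossB_assoc]
      · -- A value
        intro fuel hf
        match fuel, hf with
        | f + 1, hf =>
          have hflen : P.length + C.length + R.length + 2 < f + 1 := by
            simp at hf; omega
          have hA1 : goA f (P ++ C ++ R) = some V₁ := hV₁A f (by simp; omega)
          have hA2 : goA f (P ++ R) = some V₂ := hV₂A f (by simp; omega)
          have hchain : loopA (goA f) (P ++ '[' :: (C ++ ']' :: R)) (P ++ '[' :: (C ++ ']' :: R)) 0 0 false 0 []
              = some (0, true, P.length, V₁ ++ V₂) := by
            have c1 := loopA_literals (goA f) (P ++ '[' :: (C ++ ']' :: R)) P hP ('[' :: (C ++ ']' :: R)) 0 0 0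
            rw [c1, Nat.zero_add, loopA_open]
            have hscan : ∀ n, 1 ≤ n → n ≤ C.length → (1 : Int) + cnt (C.take n) ≠ 0 := by
              intro n _ _
              have := hC.1 n; omega
            rw [loopA_scan (goA f) _ C (P.length + 1) 1 P.length hscan (']' :: R), hC.2, add_zero]
            rw [show P.length + 1 + C.length = P.length + 1 + C.length from rfl]
            rw [loopA_close_at (goA f) P C R R V₁ V₂ hA1 hA2]
            rw [loopA_end (goA f) _ R _ 0 P.length (V₁ ++ V₂) (by simp [hV₁ne]), hR.2, add_zero]
          have hopts : V₁ ++ V₂ ≠ [] := by simp [hV₁ne]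
          show goA (f + 1) (P ++ '[' :: (C ++ ']' :: R)) = _
          rw [goA]
          rw [hchain]
          simp only [hopts, ne_eq, not_true_eq_false, if_false]
          rw [hV₁eq, hV₂eq, crossB_single_append, crossB_unit_right, crossB_append_left]

-- ===== VERDICT (by name: the statement is the Claim_ definition above) =====
theorem create_options_py_spec : Claim_equal_create_options_py := by
  intro s _ hpre
  show create_options_py s = create_options_py_alt s
  have hbal : bal s.toList := by
    obtain ⟨h1, h2⟩ := hpre
    refine ⟨?_, h2⟩
    intro n
    by_cases hn : n < s.toList.length
    · exact h1 n hn
    · rw [List.take_of_length_le (by omega)]; omega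
  obtain ⟨V, hne, hB, hA⟩ := main_aux s.toList.length s.toList le_rfl hbal
  have hAv : goA (s.length + 1) s.toList = some V := hA _ (by simp)
  have hBv : loopB s.toList [] [[]] = some ([], V) := by
    have h := hB [] [] [[]]
    rw [List.append_nil] at h
    rw [h, crossB_unit_left]
    rfl
  simp [create_options_py, create_options_py_alt, hAv, hBv]
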